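-- pv_equiv track=rewrite | github.com/GitMonsters/octotetrahedral-agi | arc-puzzle-catalog/re-arc/solves/6f542d94/solver.py | transform
-- ===== SOURCE A (Python) =====
-- def fill_row(grid, row, value):
--     for col in range(len(grid[0])):
--         grid[row][col] = value
--
-- def fill_col(grid, col, value):
--     for row in range(len(grid)):
--         grid[row][col] = value
--
-- def transform(grid):
--     out = [row[:] for row in grid]
--     rows, cols = len(out), len(out[0])
--     background = out[0][0]
--     markers = [(r, c, out[r][c]) for r in range(rows) for c in range(cols) if out[r][c] != background]
--
--     if not markers:
--         return out
--
--     marker_rows = {r for r, _, _ in markers}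
--
--     if len(marker_rows) == 1 and len(markers) >= 2:
--         ordered = sorted(markers, key=lambda item: item[1])
--         anchor_col = ordered[0][1]
--         for _, col, value in ordered:
--             fill_col(out, col, value)
--         for _, col, value in ordered[1:]:
--             reflected_col = 2 * anchor_col - col
--             if 0 <= reflected_col < cols:
--                 fill_col(out, reflected_col, value)
--         return out
--
--     for row, _, value in markers:
--         fill_row(out, row, value)
--     return out
-- ===== SOURCE B (Python) =====
-- def transform(grid):
--     rows, cols = len(grid), len(grid[0])
--     background = grid[0][0]
--     markers = [(r, c, grid[r][c]) for r in range(rows) for c in range(cols) if grid[r][c] != background]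
--     if not markers:
--         return [row[:] for row in grid]
--     marker_rows = {r for r, _, _ in markers}
--     if len(marker_rows) == 1 and len(markers) >= 2:
--         ordered = sorted(markers, key=lambda m: m[1])
--         anchor = ordered[0][1]
--         colmap = {}
--         for _, c, v in ordered:
--             colmap[c] = v
--         for _, c, v in ordered[1:]:
--             rc = 2 * anchor - c
--             if 0 <= rc < cols:
--                 colmap[rc] = v
--         return [[colmap.get(c, row[c]) for c in range(cols)] for row in grid]
--     rowmap = {}
--     for r, _, v in markers:
--         rowmap[r] = v
--     return [[rowmap[r]] * cols if r in rowmap else row[:] for r, row in enumerate(grid)]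
-- ===== Notes on version B (the rewrite author's own statement) =====
-- stated objective: simpler
-- what changed: Replaces A's repeated in-place fill_col/fill_row mutation passes over the whole grid with last-write-wins maps (colmap/rowmap) built in the same marker order, and then builds the output in a single comprehension per row, so no intermediate grid is ever mutated.
-- outside the precondition, e.g. on transform([[1, 2], [1, 2, 3]]): A returns [[2, 2], [2, 2, 3]], B returns [[2, 2], [2, 2]]
import Mathlib
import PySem

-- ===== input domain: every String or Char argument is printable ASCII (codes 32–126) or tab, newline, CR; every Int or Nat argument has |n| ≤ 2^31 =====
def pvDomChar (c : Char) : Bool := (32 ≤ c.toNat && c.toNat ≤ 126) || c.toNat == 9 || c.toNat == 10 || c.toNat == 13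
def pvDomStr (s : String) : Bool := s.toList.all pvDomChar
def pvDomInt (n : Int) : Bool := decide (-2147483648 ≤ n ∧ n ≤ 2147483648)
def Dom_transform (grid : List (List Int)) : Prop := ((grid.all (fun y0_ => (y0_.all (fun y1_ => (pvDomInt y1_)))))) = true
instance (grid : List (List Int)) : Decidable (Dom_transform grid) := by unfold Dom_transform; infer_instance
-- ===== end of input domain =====

-- B replaces A's in-place fill_col/fill_row mutation passes with last-write-wins maps and one
-- comprehension per output row (simpler); return-value equivalence only (A mutates its local copy).

-- ===== PORT A =====
-- Python 'grid[row][col] = value': exact for in-range indices (all assignments A performs are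
-- in range on grids admitted by Pre_transform).
def pySet2 (g : List (List Int)) (r c v : Int) : List (List Int) :=
  PySem.List.pySetD g r (PySem.List.pySetD (PySem.List.pyGetD g r []) c v)

def fill_row (grid : List (List Int)) (row value : Int) : List (List Int) :=
  (PySem.List.pyRange 0 ((PySem.List.pyGetD grid 0 []).length : Int) 1).foldl
    (fun g col => pySet2 g row col value) grid

def fill_col (grid : List (List Int)) (col value : Int) : List (List Int) :=
  (PySem.List.pyRange 0 (grid.length : Int) 1).foldl
    (fun g row => pySet2 g row col value) grid

-- the marker comprehension, literally identical in A and in B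
def pyMarkers (g : List (List Int)) (rows cols background : Int) : List (Int × Int × Int) :=
  (PySem.List.pyRange 0 rows 1).flatMap (fun r =>
    ((PySem.List.pyRange 0 cols 1).filter (fun c =>
        PySem.List.pyGetD (PySem.List.pyGetD g r []) c 0 != background)).map (fun c =>
      (r, c, PySem.List.pyGetD (PySem.List.pyGetD g r []) c 0)))

def transform (grid : List (List Int)) : List (List Int) :=
  let out := grid.map (fun row => PySem.List.slice row none none)
  let rows := (out.length : Int)
  let cols := ((PySem.List.pyGetD out 0 []).length : Int)
  let background := PySem.List.pyGetD (PySem.List.pyGetD out 0 []) 0 0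
  let markers := pyMarkers out rows cols background
  if markers = [] then out
  else
    let marker_rows : PySem.Set Int := PySem.Set.ofList (markers.map (fun m => m.1))
    if PySem.Set.len marker_rows = 1 ∧ 2 ≤ markers.length then
      let ordered := PySem.List.sorted markers (fun m => m.2.1) false
      let anchor_col := (PySem.List.pyGetD ordered 0 (0, 0, 0)).2.1
      let out1 := ordered.foldl (fun g m => fill_col g m.2.1 m.2.2) out
      (PySem.List.slice ordered (some 1) none).foldl
        (fun g m =>
          let reflected := 2 * anchor_col - m.2.1
          if 0 ≤ reflected ∧ reflected < cols then fill_col g reflected m.2.2 else g) out1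
    else
      markers.foldl (fun g m => fill_row g m.1 m.2.2) out

-- ===== PORT B =====
def transform_alt (grid : List (List Int)) : List (List Int) :=
  let rows := (grid.length : Int)
  let cols := ((PySem.List.pyGetD grid 0 []).length : Int)
  let background := PySem.List.pyGetD (PySem.List.pyGetD grid 0 []) 0 0
  let markers := pyMarkers grid rows cols background
  if markers = [] then grid.map (fun row => PySem.List.slice row none none)
  else
    let marker_rows : PySem.Set Int := PySem.Set.ofList (markers.map (fun m => m.1))
    if PySem.Set.len marker_rows = 1 ∧ 2 ≤ markers.length then
      let ordered := PySem.List.sorted markers (fun m => m.2.1) false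
      let anchor := (PySem.List.pyGetD ordered 0 (0, 0, 0)).2.1
      let colmap := ordered.foldl (fun d m => d.insert m.2.1 m.2.2)
        (PySem.Dict.empty : PySem.Dict Int Int)
      let colmap2 := (PySem.List.slice ordered (some 1) none).foldl
        (fun d m =>
          let rc := 2 * anchor - m.2.1
          if 0 ≤ rc ∧ rc < cols then d.insert rc m.2.2 else d) colmap
      grid.map (fun row => (PySem.List.pyRange 0 cols 1).map (fun c =>
        colmap2.getD c (PySem.List.pyGetD row c 0)))
    else
      let rowmap := markers.foldl (fun d m => d.insert m.1 m.2.2)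
        (PySem.Dict.empty : PySem.Dict Int Int)
      (PySem.List.enumerate grid 0).map (fun p =>
        if rowmap.contains p.1 then PySem.List.pyRepeat [rowmap.getD p.1 0] cols
        else PySem.List.slice p.2 none none)

-- ===== PRECONDITION & SPEC =====
-- Pre_ excludes the empty grid and grids whose first row is empty (A raises IndexError there) and
-- ragged grids (rows of unequal length): on rows shorter than row 0 A raises IndexError, and on
-- longer rows A's fill loops silently leave the tails untouched, an artefact of its mutation loops.
def Pre_transform (grid : List (List Int)) : Prop :=
  grid ≠ [] ∧ grid.headD [] ≠ [] ∧ ∀ row ∈ grid, row.length = (grid.headD []).length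
instance (grid : List (List Int)) : Decidable (Pre_transform grid) := by
  unfold Pre_transform; infer_instance
def pvWitness_transform : List (List Int) := [[0, 0], [0, 1]]
def Spec_transform (grid : List (List Int)) (out : List (List Int)) : Prop := out = transform_alt grid
instance (grid : List (List Int)) (out : List (List Int)) : Decidable (Spec_transform grid out) := by
  unfold Spec_transform; infer_instance

-- ===== CLAIM (what is proved, stated in full; the proofs are below) =====
def Claim_equal_transform : Prop := ∀ (grid : List (List Int)), Dom_transform grid → Pre_transform grid → Spec_transform grid (transform grid)

-- ===== LEMMAS AND PROOFS =====

-- small list rearrangement helpers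
theorem set_take_succ {α : Type} (xs : List α) (j : Nat) (v : α) (hj : j < xs.length) :
    (xs.set j v).take (j + 1) = xs.take j ++ [v] := by
  rw [List.set_eq_take_cons_drop v hj, List.take_append]
  have hA : (xs.take j).length = j := by simp; omega
  rw [List.take_of_length_le (by omega), hA]
  simp

theorem set_drop_succ {α : Type} (xs : List α) (j : Nat) (v : α) :
    (xs.set j v).drop (j + 1) = xs.drop (j + 1) := by
  rw [List.drop_set]
  simp

-- membership bounds of the marker comprehension
theorem mem_pyMarkers {g : List (List Int)} {rows cols background : Int}
    {m : Int × Int × Int} (h : m ∈ pyMarkers g rows cols background) :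
    0 ≤ m.1 ∧ m.1 < rows ∧ 0 ≤ m.2.1 ∧ m.2.1 < cols := by
  unfold pyMarkers at h
  simp only [List.mem_flatMap, List.mem_map, List.mem_filter,
    PySem.List.mem_pyRange_one] at h
  obtain ⟨r, ⟨hr0, hrn⟩, c, ⟨⟨hc0, hck⟩, -⟩, rfl⟩ := h
  exact ⟨hr0, hrn, hc0, hck⟩

theorem foldl_pySet2_rows (col v : Int) (fuel : Nat) :
    ∀ (j : Nat) (g : List (List Int)), g.length = j + fuel →
      (PySem.List.pyRange (j : Int) ((j + fuel : Nat) : Int) 1).foldl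
          (fun g' r => pySet2 g' r col v) g
        = g.take j ++ (g.drop j).map (fun row => PySem.List.pySetD row col v) := by
  induction fuel with
  | zero =>
    intro j g h
    rw [PySem.List.pyRange_one_eq_nil (by push_cast; omega)]
    have h1 : g.drop j = [] := List.drop_of_length_le (by omega)
    have h2 : g.take j = g := List.take_of_length_le (by omega)
    rw [List.foldl_nil, h1, h2, List.map_nil, List.append_nil]
  | succ fuel ih =>
    intro j g h
    have hj : j < g.length := by omega
    rw [PySem.List.pyRange_one_cons (by push_cast; omega)]
    simp only [List.foldl_cons]
    have hstep : pySet2 g (j : Int) col v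
        = g.set j (PySem.List.pySetD g[j] col v) := by
      unfold pySet2
      rw [PySem.List.pyGetD_natCast, PySem.List.pySetD_natCast,
        List.getD_eq_getElem _ _ hj]
    have hcast : ((j : Int) + 1) = ((j + 1 : Nat) : Int) := by push_cast; ring
    have hcast2 : ((j + (fuel + 1) : Nat) : Int) = (((j + 1) + fuel : Nat) : Int) := by
      push_cast; ring
    rw [hstep, hcast, hcast2, ih (j + 1) _ (by simp [h]; omega)]
    rw [set_take_succ _ _ _ hj, set_drop_succ]
    rw [List.drop_eq_getElem_cons hj, List.map_cons]
    simp only [List.append_assoc, List.cons_append, List.nil_append]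

-- fill_col is a map over the rows
theorem fill_col_eq (g : List (List Int)) (col v : Int) :
    fill_col g col v = g.map (fun row => PySem.List.pySetD row col v) := by
  have h := foldl_pySet2_rows col v g.length 0 g (by omega)
  simpa using h

-- a fold of (guarded) fill_cols is a map of per-row folds
theorem grid_fold_map (G : (Int × Int × Int) → Prop) [DecidablePred G]
    (key val : (Int × Int × Int) → Int) (L : List (Int × Int × Int)) :
    ∀ g : List (List Int),
      L.foldl (fun g m => if G m then fill_col g (key m) (val m) else g) g
        = g.map (fun row =>
            L.foldl (fun rw m => if G m then PySem.List.pySetD rw (key m) (val m) else rw) row) := by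
  induction L with
  | nil => intro g; simp
  | cons m L ih =>
    intro g
    by_cases hG : G m
    · rw [List.foldl_cons, if_pos hG, fill_col_eq, ih, List.map_map]
      apply List.map_congr_left
      intro row _
      simp [hG]
    · rw [List.foldl_cons, if_neg hG, ih]
      apply List.map_congr_left
      intro row _
      simp [hG]

-- per-row fold vs dict fold (last write wins)
theorem row_fold_dict (G : (Int × Int × Int) → Prop) [DecidablePred G]
    (key val : (Int × Int × Int) → Int) (L : List (Int × Int × Int)) (k : Nat)
    (hL : ∀ m ∈ L, G m → 0 ≤ key m ∧ key m < (k : Int)) :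
    ∀ (rw : List Int) (d : PySem.Dict Int Int) (row₀ : List Int),
      rw.length = k →
      (∀ c : Nat, c < k → rw.getD c 0 = d.getD (c : Int) (row₀.getD c 0)) →
      (L.foldl (fun rw m => if G m then PySem.List.pySetD rw (key m) (val m) else rw) rw).length = k ∧
      ∀ c : Nat, c < k →
        (L.foldl (fun rw m => if G m then PySem.List.pySetD rw (key m) (val m) else rw) rw).getD c 0
          = (L.foldl (fun d m => if G m then d.insert (key m) (val m) else d) d).getD (c : Int)
              (row₀.getD c 0) := by
  induction L with
  | nil => intro rw d row₀ hlen hrel; exact ⟨hlen, hrel⟩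
  | cons m L ih =>
    intro rw d row₀ hlen hrel
    simp only [List.foldl_cons]
    by_cases hG : G m
    · simp only [if_pos hG]
      obtain ⟨hk0, hkk⟩ := hL m List.mem_cons_self hG
      have hkey : key m = ((key m).toNat : Int) := (Int.toNat_of_nonneg hk0).symm
      have hilt : (key m).toNat < k := by omega
      rw [hkey, PySem.List.pySetD_natCast]
      refine ih (fun m' hm' hG' => hL m' (List.mem_cons_of_mem _ hm') hG')
        (rw.set (key m).toNat (val m)) (d.insert ((key m).toNat : Int) (val m)) row₀
        (by simp [hlen]) ?_
      intro c hc
      have hslen : (rw.set (key m).toNat (val m)).length = k := by simp [hlen]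
      rw [PySem.Dict.getD_insert]
      by_cases hci : c = (key m).toNat
      · rw [if_pos (by omega), hci, List.getD_eq_getElem _ _ (by omega),
          List.getElem_set_self (by omega)]
      · have hne : (key m).toNat ≠ c := by omega
        rw [if_neg (by omega), List.getD_eq_getElem _ _ (by omega),
          List.getElem_set_ne hne, ← List.getD_eq_getElem _ _ (by omega : c < rw.length)]
        exact hrel c hc
    · simp only [if_neg hG]
      exact ih (fun m' hm' hG' => hL m' (List.mem_cons_of_mem _ hm') hG') rw d row₀ hlen hrel

theorem foldl_pySetD_aux (v : Int) (fuel : Nat) :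
    ∀ (j : Nat) (xs : List Int), xs.length = j + fuel →
      (PySem.List.pyRange (j : Int) ((j + fuel : Nat) : Int) 1).foldl
          (fun rw c => PySem.List.pySetD rw c v) xs
        = xs.take j ++ List.replicate fuel v := by
  induction fuel with
  | zero =>
    intro j xs h
    rw [PySem.List.pyRange_one_eq_nil (by push_cast; omega)]
    have h2 : xs.take j = xs := List.take_of_length_le (by omega)
    rw [List.foldl_nil, h2, List.replicate_zero, List.append_nil]
  | succ fuel ih =>
    intro j xs h
    have hj : j < xs.length := by omega
    rw [PySem.List.pyRange_one_cons (by push_cast; omega)]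
    simp only [List.foldl_cons, PySem.List.pySetD_natCast]
    have hcast : ((j : Int) + 1) = ((j + 1 : Nat) : Int) := by push_cast; ring
    have hcast2 : ((j + (fuel + 1) : Nat) : Int) = (((j + 1) + fuel : Nat) : Int) := by
      push_cast; ring
    rw [hcast, hcast2, ih (j + 1) _ (by simp [h]; omega)]
    rw [set_take_succ _ _ _ hj]
    simp [List.replicate_succ]

-- setting every position 0..k-1 of a length-k row yields replicate
theorem foldl_pySetD_range (v : Int) (k : Nat) (xs : List Int) (h : xs.length = k) :
    (PySem.List.pyRange 0 (k : Int) 1).foldl (fun rw c => PySem.List.pySetD rw c v) xs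
      = List.replicate k v := by
  have h2 := foldl_pySetD_aux v k 0 xs (by omega)
  simpa using h2

theorem foldl_pySet2_cols (r : Nat) (v : Int) (cs : List Int) :
    ∀ (g : List (List Int)), r < g.length →
      cs.foldl (fun g' c => pySet2 g' (r : Int) c v) g
        = g.set r (cs.foldl (fun rw c => PySem.List.pySetD rw c v) (g.getD r [])) := by
  induction cs with
  | nil =>
    intro g h
    simp only [List.foldl_nil]
    rw [List.getD_eq_getElem _ _ h]
    exact (List.set_getElem_self h).symm
  | cons c cs ih =>
    intro g h
    simp only [List.foldl_cons]
    have hstep : pySet2 g (r : Int) c v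
        = g.set r (PySem.List.pySetD (g.getD r []) c v) := by
      unfold pySet2
      rw [PySem.List.pyGetD_natCast, PySem.List.pySetD_natCast]
    rw [hstep, ih _ (by simp [h])]
    have hx : (g.set r (PySem.List.pySetD (g.getD r []) c v)).getD r []
        = PySem.List.pySetD (g.getD r []) c v := by
      rw [List.getD_eq_getElem _ _ (by simp [h]), List.getElem_set_self (by simp [h])]
    rw [hx, List.set_set]

-- fill_row sets row r (and nothing else)
theorem fill_row_eq (g : List (List Int)) (r : Nat) (v : Int) (h : r < g.length) :
    fill_row g (r : Int) v
      = g.set r ((PySem.List.pyRange 0 ((PySem.List.pyGetD g 0 []).length : Int) 1).foldl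
          (fun rw c => PySem.List.pySetD rw c v) (g.getD r [])) := by
  unfold fill_row
  exact foldl_pySet2_cols r v _ g h

-- branch-2 invariant: the fill_row fold tracks the rowmap dict
theorem rowbranch (n k : Nat) (grid₀ : List (List Int)) (hg : grid₀.length = n)
    (hrect : ∀ row ∈ grid₀, row.length = k) (hn : 0 < n)
    (L : List (Int × Int × Int)) (hL : ∀ m ∈ L, 0 ≤ m.1 ∧ m.1 < (n : Int)) :
    ∀ (g : List (List Int)) (d : PySem.Dict Int Int),
      g.length = n →
      (∀ r : Nat, r < n → g.getD r [] = (match d.get? (r : Int) with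
          | some v => List.replicate k v
          | none => grid₀.getD r [])) →
      (L.foldl (fun g m => fill_row g m.1 m.2.2) g).length = n ∧
      ∀ r : Nat, r < n →
        (L.foldl (fun g m => fill_row g m.1 m.2.2) g).getD r []
          = (match (L.foldl (fun d m => d.insert m.1 m.2.2) d).get? (r : Int) with
              | some v => List.replicate k v
              | none => grid₀.getD r []) := by
  induction L with
  | nil => intro g d hlen hrel; exact ⟨hlen, hrel⟩
  | cons m L ih =>
    intro g d hlen hrel
    obtain ⟨hm0, hmn⟩ := hL m List.mem_cons_self
    have hm : m.1 = ((m.1.toNat : Nat) : Int) := (Int.toNat_of_nonneg hm0).symm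
    have hr₀ : m.1.toNat < n := by omega
    have hrowk : ∀ r : Nat, r < n → (g.getD r []).length = k := by
      intro r hr
      rw [hrel r hr]
      cases hd : d.get? (r : Int) with
      | some v => simp
      | none =>
        simp only
        rw [List.getD_eq_getElem _ _ (by omega)]
        exact hrect _ (List.getElem_mem _)
    have hfill : fill_row g m.1 m.2.2 = g.set m.1.toNat (List.replicate k m.2.2) := by
      rw [hm, fill_row_eq g m.1.toNat m.2.2 (by rw [hlen]; exact hr₀)]
      congr 1
      have hK : ((PySem.List.pyGetD g 0 []).length : Int) = (k : Int) := by
        rw [PySem.List.pyGetD_zero, hrowk 0 hn]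
      rw [hK, foldl_pySetD_range _ k _ (hrowk _ hr₀)]
    simp only [List.foldl_cons, hfill]
    refine ih (fun m' hm' => hL m' (List.mem_cons_of_mem _ hm'))
      (g.set m.1.toNat (List.replicate k m.2.2)) (d.insert m.1 m.2.2)
      (by simp [hlen]) ?_
    intro r hr
    have hslen : (g.set m.1.toNat (List.replicate k m.2.2)).length = n := by simp [hlen]
    rw [PySem.Dict.get?_insert]
    by_cases hrm : (r : Int) = m.1
    · have hreq : r = m.1.toNat := by omega
      rw [if_pos hrm, hreq, List.getD_eq_getElem _ _ (by omega),
        List.getElem_set_self (by omega)]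
    · have hne : m.1.toNat ≠ r := by omega
      rw [if_neg hrm, List.getD_eq_getElem _ _ (by omega), List.getElem_set_ne hne,
        ← List.getD_eq_getElem _ _ (by omega : r < g.length)]
      exact hrel r hr

-- branch 1: the two fill_col passes equal the colmap lookup comprehension
theorem branch1_eq (grid : List (List Int)) (k : Nat) (cols : Int) (hcols : cols = (k : Int))
    (hrect : ∀ row ∈ grid, row.length = k)
    (L : List (Int × Int × Int)) (hLb : ∀ m ∈ L, 0 ≤ m.2.1 ∧ m.2.1 < (k : Int)) (anchor : Int) :
    (L.tail).foldl
        (fun g m => if 0 ≤ 2 * anchor - m.2.1 ∧ 2 * anchor - m.2.1 < cols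
          then fill_col g (2 * anchor - m.2.1) m.2.2 else g)
        (L.foldl (fun g m => fill_col g m.2.1 m.2.2) grid)
      = grid.map (fun row => (PySem.List.pyRange 0 cols 1).map (fun c =>
          ((L.tail).foldl
            (fun d m => if 0 ≤ 2 * anchor - m.2.1 ∧ 2 * anchor - m.2.1 < cols
              then d.insert (2 * anchor - m.2.1) m.2.2 else d)
            (L.foldl (fun d m => d.insert m.2.1 m.2.2)
              (PySem.Dict.empty : PySem.Dict Int Int))).getD c
            (PySem.List.pyGetD row c 0))) := by
  subst hcols
  have h1 : L.foldl (fun g m => fill_col g m.2.1 m.2.2) grid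
      = L.foldl (fun g m =>
          if (fun (_ : Int × Int × Int) => True) m then fill_col g m.2.1 m.2.2 else g) grid := by
    simp
  have h1d : L.foldl (fun d m => d.insert m.2.1 m.2.2)
        (PySem.Dict.empty : PySem.Dict Int Int)
      = L.foldl (fun d m =>
          if (fun (_ : Int × Int × Int) => True) m then d.insert m.2.1 m.2.2 else d)
        (PySem.Dict.empty : PySem.Dict Int Int) := by
    simp
  rw [h1, h1d,
    grid_fold_map (fun _ => True) (fun m => m.2.1) (fun m => m.2.2) L grid,
    grid_fold_map (fun m => 0 ≤ 2 * anchor - m.2.1 ∧ 2 * anchor - m.2.1 < (k : Int))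
      (fun m => 2 * anchor - m.2.1) (fun m => m.2.2) L.tail _,
    List.map_map]
  apply List.map_congr_left
  intro row hrow
  have hrk : row.length = k := hrect row hrow
  obtain ⟨hlen1, hrel1⟩ := row_fold_dict (fun _ => True) (fun m => m.2.1) (fun m => m.2.2) L k
    (fun m hm _ => hLb m hm) row (PySem.Dict.empty : PySem.Dict Int Int) row hrk
    (fun c hc => by simp [PySem.Dict.getD_empty])
  obtain ⟨hlen2, hrel2⟩ := row_fold_dict
    (fun m => 0 ≤ 2 * anchor - m.2.1 ∧ 2 * anchor - m.2.1 < (k : Int))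
    (fun m => 2 * anchor - m.2.1) (fun m => m.2.2) L.tail k
    (fun m _ hG => hG) _ _ row hlen1 hrel1
  apply List.ext_getElem
  · simp only [Function.comp_apply]
    rw [hlen2]
    simp [PySem.List.length_pyRange_one]
  · intro c hc1 hc2
    simp only [Function.comp_apply] at hc1 ⊢
    have hck : c < k := by rw [hlen2] at hc1; exact hc1
    rw [List.getElem_map, PySem.List.getElem_pyRange_one]
    simp only [zero_add, PySem.List.pyGetD_natCast]
    rw [← List.getD_eq_getElem _ _ hc1]
    exact hrel2 c hck

-- branch 2: the fill_row pass equals the rowmap lookup comprehension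
theorem branch2_eq (grid : List (List Int)) (n k : Nat) (cols : Int)
    (hg : grid.length = n) (hcols : cols = (k : Int)) (hn : 0 < n)
    (hrect : ∀ row ∈ grid, row.length = k)
    (M : List (Int × Int × Int)) (hMb : ∀ m ∈ M, 0 ≤ m.1 ∧ m.1 < (n : Int)) :
    M.foldl (fun g m => fill_row g m.1 m.2.2) grid
      = (PySem.List.enumerate grid 0).map (fun p =>
          if (M.foldl (fun d m => d.insert m.1 m.2.2)
              (PySem.Dict.empty : PySem.Dict Int Int)).contains p.1
          then PySem.List.pyRepeat
            [(M.foldl (fun d m => d.insert m.1 m.2.2)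
              (PySem.Dict.empty : PySem.Dict Int Int)).getD p.1 0] cols
          else p.2) := by
  subst hcols
  obtain ⟨hlenf, hrelf⟩ := rowbranch n k grid hg hrect hn M hMb grid
    (PySem.Dict.empty : PySem.Dict Int Int) hg
    (fun r hr => by simp [PySem.Dict.get?_empty])
  apply List.ext_getElem
  · rw [hlenf]
    simp [PySem.List.length_enumerate, hg]
  · intro r hc1 hc2
    have hr : r < n := by rw [hlenf] at hc1; exact hc1
    have hrg : r < grid.length := by omega
    rw [List.getElem_map, PySem.List.getElem_enumerate]
    simp only [zero_add]
    rw [← List.getD_eq_getElem _ _ hc1, hrelf r hr]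
    cases hget : (M.foldl (fun d m => d.insert m.1 m.2.2)
        (PySem.Dict.empty : PySem.Dict Int Int)).get? (r : Int) with
    | none =>
      have hcont : (M.foldl (fun d m => d.insert m.1 m.2.2)
          (PySem.Dict.empty : PySem.Dict Int Int)).contains (r : Int) = false := by
        rw [PySem.Dict.contains_eq_isSome_get?, hget]; rfl
      rw [if_neg (by simp [hcont]), List.getD_eq_getElem _ _ hrg]
    | some v =>
      have hcont : (M.foldl (fun d m => d.insert m.1 m.2.2)
          (PySem.Dict.empty : PySem.Dict Int Int)).contains (r : Int) = true := by
        rw [PySem.Dict.contains_eq_isSome_get?, hget]; rfl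
      rw [if_pos (by simp [hcont]), PySem.Dict.getD_eq_get?_getD, hget]
      simp [PySem.List.pyRepeat_singleton]

-- ===== VERDICT (by name: the statement is the Claim_ definition above) =====
theorem transform_spec : Claim_equal_transform := by
  intro grid _ hpre
  obtain ⟨hne, hhead, hrect⟩ := hpre
  unfold Spec_transform
  have hn : 0 < grid.length := List.length_pos_of_ne_nil hne
  have hcols : ((PySem.List.pyGetD grid 0 []).length : Int) = ((grid.headD []).length : Int) := by
    rw [PySem.List.pyGetD_zero]
    cases grid with
    | nil => exact absurd rfl hne
    | cons a t => simp
  unfold transform transform_alt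
  simp only [PySem.List.slice_none_none, List.map_id', PySem.List.slice_from_one]
  split_ifs with hM hbr
  · rfl
  · -- reflection branch
    refine branch1_eq grid (grid.headD []).length _ hcols hrect _ ?_ _
    intro m hm
    have hmM := (PySem.List.mem_sorted _ _ _ _).mp hm
    have hb := mem_pyMarkers hmM
    rw [hcols] at hb
    exact ⟨hb.2.2.1, hb.2.2.2⟩
  · -- general branch
    refine branch2_eq grid grid.length (grid.headD []).length _ rfl hcols hn hrect _ ?_
    intro m hm
    have hb := mem_pyMarkers hm
    exact ⟨hb.1, hb.2.1⟩
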